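-- pv_equiv track=rewrite | github.com/salah-zaiem/augmentations | selection/utils.py | initialize_speakers_triplets
-- ===== SOURCE A (Python) =====
-- def initialize_speakers_triplets(loaded_triplets) :
--     speakers_dict = {}
--     counter = 0
--     for triplets in loaded_triplets  :
--         potential_speakers = [x[0] for x in triplets]
--         for spk in potential_speakers :
--             if spk not in speakers_dict :
--                 speakers_dict[spk] = counter
--                 counter +=1
--     return speakers_dict
-- ===== SOURCE B (Python) =====
-- def initialize_speakers_triplets(loaded_triplets):
--     flat = [x[0] for triplets in loaded_triplets for x in triplets]
--     first = {}
--     for pos, spk in reversed(list(enumerate(flat))):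
--         first[spk] = pos
--     order = sorted(first.items(), key=lambda item: item[1])
--     return {spk: rank for rank, (spk, _) in enumerate(order)}
-- ===== Notes on version B (the rewrite author's own statement) =====
-- stated objective: alternative
-- what changed: Replaces A's single guarded pass (membership test + manual counter) by a position-based algorithm: a reverse sweep with unconditional overwrites records each speaker's first position, then the (speaker, position) pairs are sorted by position and ranked by enumeration.
import Mathlib
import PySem

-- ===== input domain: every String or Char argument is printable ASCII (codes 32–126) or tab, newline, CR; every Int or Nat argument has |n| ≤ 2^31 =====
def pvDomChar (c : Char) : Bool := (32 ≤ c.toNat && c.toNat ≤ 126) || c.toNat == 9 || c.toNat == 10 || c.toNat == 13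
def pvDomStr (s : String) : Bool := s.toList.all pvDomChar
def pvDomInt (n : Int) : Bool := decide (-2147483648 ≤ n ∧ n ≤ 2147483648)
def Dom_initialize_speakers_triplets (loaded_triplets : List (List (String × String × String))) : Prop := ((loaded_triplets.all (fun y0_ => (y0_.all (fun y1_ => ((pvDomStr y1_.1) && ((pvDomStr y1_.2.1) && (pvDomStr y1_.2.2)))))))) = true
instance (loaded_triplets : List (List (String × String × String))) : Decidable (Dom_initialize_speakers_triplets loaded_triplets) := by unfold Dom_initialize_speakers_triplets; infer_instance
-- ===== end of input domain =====

-- B replaces A's single guarded pass (membership test + manual counter) by a position-based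
-- algorithm: a reverse sweep with unconditional dict overwrites records each speaker's first
-- position, then the (speaker, position) pairs are sorted by position and ranked by enumeration.

-- ===== PORT A =====
-- A's loop state: (speakers_dict, counter); the dict is returned as its items list.
def initialize_speakers_triplets (loaded_triplets : List (List (String × String × String))) : List (String × Int) :=
  (loaded_triplets.foldl
    (fun (st : PySem.Dict String Int × Int) triplets =>
      -- potential_speakers = [x[0] for x in triplets]; for spk in potential_speakers:
      (triplets.map (fun x => x.1)).foldl
        (fun st spk =>
          if st.1.contains spk then st
          else (st.1.insert spk st.2, st.2 + 1))
        st)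
    (PySem.Dict.empty, 0)).1.items

-- ===== PORT B =====
def initialize_speakers_triplets_alt (loaded_triplets : List (List (String × String × String))) : List (String × Int) :=
  let flat := loaded_triplets.flatMap (fun triplets => triplets.map (fun x => x.1))
  -- for pos, spk in reversed(list(enumerate(flat))): first[spk] = pos
  let first := ((PySem.List.enumerate flat).reverse).foldl
    (fun (d : PySem.Dict String Int) p => d.insert p.2 p.1) PySem.Dict.empty
  -- order = sorted(first.items(), key=lambda item: item[1])
  let order := PySem.List.sorted first.items (fun item => item.2) false
  -- {spk: rank for rank, (spk, _) in enumerate(order)}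
  (PySem.List.enumerate order).map (fun p => (p.2.1, p.1))

-- ===== PRECONDITION & SPEC =====
def Spec_initialize_speakers_triplets (loaded_triplets : List (List (String × String × String))) (out : List (String × Int)) : Prop := out = initialize_speakers_triplets_alt loaded_triplets
instance (loaded_triplets : List (List (String × String × String))) (out : List (String × Int)) : Decidable (Spec_initialize_speakers_triplets loaded_triplets out) := by unfold Spec_initialize_speakers_triplets; infer_instance

-- ===== CLAIM (what is proved, stated in full; the proofs are below) =====
def Claim_equal_initialize_speakers_triplets : Prop := ∀ (loaded_triplets : List (List (String × String × String))), Dom_initialize_speakers_triplets loaded_triplets → Spec_initialize_speakers_triplets loaded_triplets (initialize_speakers_triplets loaded_triplets)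

-- ===== LEMMAS AND PROOFS =====

-- first-appearance index pairs of 'seen': [(s0,0), (s1,1), …]
def pvEnumItems (seen : List String) : List (String × Int) :=
  (PySem.List.enumerate seen).map (fun p => (p.2, p.1))

-- (speaker, first position) pairs of a list, speakers in first-occurrence order,
-- positions counted from i
def pvFirsts : List String → Int → List (String × Int)
  | [], _ => []
  | h :: t, i => (h, i) :: (pvFirsts t (i + 1)).filter (fun p => p.1 != h)

theorem pvEnumerate_append_singleton (xs : List String) (y : String) (s : Int) :
    PySem.List.enumerate (xs ++ [y]) s = PySem.List.enumerate xs s ++ [(s + xs.length, y)] := by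
  induction xs generalizing s with
  | nil => simp [PySem.List.enumerate_cons, PySem.List.enumerate_nil]
  | cons a as ih =>
    simp [PySem.List.enumerate_cons, ih]
    omega

theorem pvEnumItems_append (seen : List String) (y : String) :
    pvEnumItems (seen ++ [y]) = pvEnumItems seen ++ [(y, (seen.length : Int))] := by
  simp [pvEnumItems, pvEnumerate_append_singleton]

theorem pvKeys_enum (seen : List String) :
    (PySem.Dict.mk (pvEnumItems seen)).keys = seen := by
  simp only [pvEnumItems, PySem.Dict.keys_mk, List.map_map]
  exact PySem.List.map_snd_enumerate seen 0

-- A's inner loop, characterised through the ordered-dedup state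
theorem pvLoopA (l : List String) (seen : List String) (hn : seen.Nodup) :
    l.foldl
      (fun (st : PySem.Dict String Int × Int) spk =>
        if st.1.contains spk then st else (st.1.insert spk st.2, st.2 + 1))
      (PySem.Dict.mk (pvEnumItems seen), (seen.length : Int))
    = (PySem.Dict.mk (pvEnumItems (PySem.Set.update seen l)), ((PySem.Set.update seen l).length : Int)) := by
  induction l generalizing seen with
  | nil => simp [PySem.Set.update_nil]
  | cons x xs ih =>
    rw [PySem.Set.update_cons]
    by_cases hx : x ∈ seen
    · have hc : (PySem.Dict.mk (pvEnumItems seen)).contains x = true := by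
        rw [PySem.Dict.contains_iff_mem_keys, pvKeys_enum]; exact hx
      simp only [List.foldl_cons, hc, if_true, PySem.Set.add_of_mem hx, ih seen hn]
    · have hc : (PySem.Dict.mk (pvEnumItems seen)).contains x = false := by
        rw [Bool.eq_false_iff]
        intro h
        rw [PySem.Dict.contains_iff_mem_keys, pvKeys_enum] at h
        exact hx h
      have hins : ((PySem.Dict.mk (pvEnumItems seen)).insert x (seen.length : Int))
          = PySem.Dict.mk (pvEnumItems (seen ++ [x])) := by
        apply PySem.Dict.ext
        rw [PySem.Dict.items_insert_of_not_contains _ _ hc, pvEnumItems_append]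
      simp only [List.foldl_cons, hc, Bool.false_eq_true, if_false, hins,
        PySem.Set.add_of_not_mem hx]
      have hn' : (seen ++ [x]).Nodup := by
        simp [List.nodup_append, hn]
        exact fun a ha h => hx (h ▸ ha)
      have := ih (seen ++ [x]) hn'
      simpa [List.length_append] using this

-- lookup in B's reverse-built dict = first matching pair of the forward enumeration
theorem pvGet_foldr_insert (E : List (Int × String)) (d0 : PySem.Dict String Int) (s : String) :
    (E.foldr (fun p d => d.insert p.2 p.1) d0).get? s =
      match E.find? (fun p => p.2 == s) with
      | some p => some p.1
      | none => d0.get? s := by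
  induction E with
  | nil => rfl
  | cons p E' ih =>
    rw [List.foldr_cons, List.find?_cons, PySem.Dict.get?_insert]
    by_cases h : s = p.2
    · simp [h]
    · have hb : (p.2 == s) = false := by simp [Ne.symm h]
      simp [h, hb, ih]

-- membership in pvFirsts = first matching pair of the enumeration
theorem pv_mem_firsts (flat : List String) (i : Int) (s : String) (v : Int) :
    (s, v) ∈ pvFirsts flat i ↔
      (PySem.List.enumerate flat i).find? (fun p => p.2 == s) = some (v, s) := by
  induction flat generalizing i with
  | nil => simp [pvFirsts, PySem.List.enumerate_nil]
  | cons h t ih =>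
    rw [PySem.List.enumerate_cons, List.find?_cons]
    by_cases hs : s = h
    · subst hs
      have hb : (((i, s) : Int × String).2 == s) = true := by simp
      simp only [hb]
      simp only [pvFirsts, List.mem_cons, List.mem_filter]
      constructor
      · rintro (he | ⟨_, hbad⟩)
        · rw [Prod.mk.injEq] at he
          rw [he.2]
        · simp at hbad
      · intro hf
        have hvi : i = v := congrArg Prod.fst (Option.some.inj hf)
        left
        rw [Prod.mk.injEq]
        exact ⟨rfl, hvi.symm⟩
    · have hb : (((i, h) : Int × String).2 == s) = false := by
        simp [Ne.symm hs]
      simp only [hb]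
      simp only [pvFirsts, List.mem_cons, List.mem_filter]
      rw [← ih (i + 1)]
      constructor
      · rintro (he | ⟨hm, _⟩)
        · exact absurd (congrArg Prod.fst he) hs
        · exact hm
      · intro hm
        right
        exact ⟨hm, by simp [hs]⟩

theorem pv_firsts_lb (flat : List String) (i : Int) :
    ∀ p ∈ pvFirsts flat i, i ≤ p.2 := by
  induction flat generalizing i with
  | nil => simp [pvFirsts]
  | cons h t ih =>
    intro p hp
    simp only [pvFirsts, List.mem_cons, List.mem_filter] at hp
    rcases hp with he | ⟨hm, _⟩
    · simp [he]
    · have := ih (i + 1) p hm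
      omega

theorem pv_firsts_pairwise (flat : List String) (i : Int) :
    (pvFirsts flat i).Pairwise (fun a b => a.2 < b.2) := by
  induction flat generalizing i with
  | nil => simp [pvFirsts]
  | cons h t ih =>
    refine List.Pairwise.cons ?_ (List.Pairwise.filter _ (ih (i + 1)))
    intro p hp
    have h1 := pv_firsts_lb t (i + 1) p (List.mem_of_mem_filter hp)
    show i < p.2
    omega

theorem pv_firsts_keys_nodup (flat : List String) (i : Int) :
    ((pvFirsts flat i).map (·.1)).Nodup := by
  induction flat generalizing i with
  | nil => simp [pvFirsts]
  | cons h t ih =>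
    simp only [pvFirsts, List.map_cons, List.nodup_cons]
    constructor
    · intro hmem
      rcases List.mem_map.mp hmem with ⟨p, hp, hph⟩
      have := (List.mem_filter.mp hp).2
      simp [hph] at this
    · exact List.Nodup.sublist
        (List.Sublist.map (fun p : String × Int => p.1) List.filter_sublist) (ih (i + 1))

-- A's ordered dedup = the speakers of pvFirsts (outside 'seen'), in order
theorem pv_update_eq_firsts (flat : List String) :
    ∀ (seen : List String) (i : Int),
      PySem.Set.update seen flat
        = seen ++ ((pvFirsts flat i).filter (fun p => decide (p.1 ∉ seen))).map (·.1) := by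
  induction flat with
  | nil => intro seen i; simp [pvFirsts, PySem.Set.update_nil]
  | cons h t ih =>
    intro seen i
    rw [PySem.Set.update_cons]
    by_cases hx : h ∈ seen
    · rw [PySem.Set.add_of_mem hx, ih seen (i + 1)]
      simp only [pvFirsts, List.filter_cons]
      have hh : (decide (h ∉ seen)) = false := by simpa using hx
      rw [hh]
      simp only [List.filter_filter]
      congr 2
      apply List.filter_congr
      intro p _
      by_cases hp : p.1 ∈ seen
      · simp [hp]
      · have : p.1 ≠ h := fun he => hp (he ▸ hx)
        simp [hp, this]
    · rw [PySem.Set.add_of_not_mem hx, ih (seen ++ [h]) (i + 1)]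
      simp only [pvFirsts, List.filter_cons]
      have hh : (decide (h ∉ seen)) = true := by simpa using hx
      rw [hh]
      simp only [List.filter_filter, List.append_assoc, List.singleton_append]
      congr 3
      apply List.filter_congr
      intro p _
      by_cases hp : p.1 ∈ seen
      · simp [hp]
      · by_cases hph : p.1 = h <;> simp [hp, hph]

-- sorting B's dict items by position recovers pvFirsts
theorem pv_sorted_items (flat : List String) :
    PySem.List.sorted
      (((PySem.List.enumerate flat).reverse).foldl
        (fun (d : PySem.Dict String Int) p => d.insert p.2 p.1) PySem.Dict.empty).items
      (fun item => item.2) false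
    = pvFirsts flat 0 := by
  set d := ((PySem.List.enumerate flat).reverse).foldl
    (fun (d : PySem.Dict String Int) p => d.insert p.2 p.1) PySem.Dict.empty with hd
  have hkeys : d.keys.Nodup := by
    rw [hd]
    exact PySem.Dict.nodup_keys_foldl_insert_key ((PySem.List.enumerate flat).reverse)
      (fun p : Int × String => p.2) (fun _ p => p.1) PySem.Dict.empty
      PySem.Dict.nodup_keys_empty
  have hitems : d.items.Nodup := by
    have h := hkeys
    simp only [PySem.Dict.keys] at h
    exact h.of_map _
  have hfoldr : d = (PySem.List.enumerate flat).foldr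
      (fun p (d : PySem.Dict String Int) => d.insert p.2 p.1) PySem.Dict.empty := by
    rw [hd, List.foldl_reverse]
  have hmem : ∀ p : String × Int, p ∈ d.items ↔ p ∈ pvFirsts flat 0 := by
    intro ⟨s, v⟩
    rw [← PySem.Dict.get?_eq_some_iff_mem_items d s v hkeys, hfoldr,
      pvGet_foldr_insert, pv_mem_firsts]
    cases hf : (PySem.List.enumerate flat).find? (fun p => p.2 == s) with
    | none => simp [PySem.Dict.get?_empty]
    | some q =>
      have hq : (q.2 == s) = true := by simpa using List.find?_some hf
      have hq2 : q.2 = s := by simpa using hq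
      constructor
      · rintro h
        have : q.1 = v := by simpa using h
        simp [← this, ← hq2]
      · intro h
        have : q = (v, s) := by simpa using h
        simp [this]
  have hperm : (pvFirsts flat 0).Perm d.items := by
    rw [List.perm_ext_iff_of_nodup ?_ hitems]
    · intro p
      exact (hmem p).symm
    · exact (pv_firsts_keys_nodup flat 0).of_map (·.1)
  exact PySem.List.sorted_eq_of_perm_of_pairwise_lt _ _ _ hperm (pv_firsts_pairwise flat 0)

-- ranking a pair list by enumeration = pvEnumItems of its first components
theorem pv_enum_map (L : List (String × Int)) (s : Int) :
    (PySem.List.enumerate (L.map (·.1)) s).map (fun p => (p.2, p.1))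
      = (PySem.List.enumerate L s).map (fun p => (p.2.1, p.1)) := by
  induction L generalizing s with
  | nil => simp [PySem.List.enumerate_nil]
  | cons a as ih => simp [PySem.List.enumerate_cons, ih]

-- ===== VERDICT (by name: the statement is the Claim_ definition above) =====
theorem initialize_speakers_triplets_spec : Claim_equal_initialize_speakers_triplets := by
  intro lt _
  unfold Spec_initialize_speakers_triplets initialize_speakers_triplets initialize_speakers_triplets_alt
  rw [← List.foldl_flatMap]
  rw [show (PySem.Dict.empty, (0:Int)) = ((PySem.Dict.mk (pvEnumItems ([]:List String))), ((([]:List String).length : Int))) from rfl]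
  rw [pvLoopA _ [] List.nodup_nil]
  simp only [pv_sorted_items]
  have hupd := pv_update_eq_firsts (lt.flatMap (fun triplets => triplets.map (fun x => x.1))) [] 0
  simp only [List.nil_append, List.not_mem_nil, not_false_iff, decide_true, List.filter_true] at hupd
  rw [hupd]
  simp only [pvEnumItems]
  exact pv_enum_map
    (pvFirsts (lt.flatMap (fun triplets => triplets.map (fun x => x.1))) 0) 0
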